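-- pv_equiv track=rewrite | github.com/JustAFloatingHead/KuhanPiirran | FunctionOperator.py | is_alpha_starter
-- ===== SOURCE A (Python) =====
-- def is_nro_symbol_sequence(strin): #TESTED
--     #add_to_call_counter("is_nro_symbol_sequence")
--     for cha in strin:
--         if cha not in ["0","1","2","3","4","5","6","7","8","9","."]:
--             return False
--     return True
--
-- def is_nros_and_letters(strin):#TESTED
--     for cha in strin:
--         if is_nro_symbol_sequence(cha)==False and cha.isalpha()==False and cha != " ": #" " option added 19.1 hope it doensn't break anything
--             return False
--     return True
--
-- def is_pure_alpha(strin):#TESTED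
--     for cha in strin:
--         if cha.isalpha()==False:
--             return False
--     return True
--
-- def is_alpha_starter(strin):#TESTED
--     if len(strin)==0:
--         return False
--     if is_nros_and_letters(strin)==False:
--         return False
--     if is_pure_alpha(strin[0])==False: #strin must start with at least one alpha
--         return False
--
--     bets_are_off=False
--     for cha in strin:
--         if cha.isalpha()==False and cha!=" ": #i.e. it is a number, " " option added 20.1
--             bets_are_off=True
--         if bets_are_off and cha.isalpha():
--             return False
--     return True
-- ===== SOURCE B (Python) =====
-- def is_alpha_starter(strin):
--     rev = strin[::-1]
--     k = next((i for i, ch in enumerate(rev) if ch.isalpha()), None)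
--     if k is None:
--         return False
--     if any(ch not in "0123456789. " for ch in rev[:k]):
--         return False
--     if any(not (ch.isalpha() or ch == " ") for ch in rev[k:]):
--         return False
--     return rev[-1].isalpha()
-- ===== Notes on version B (the rewrite author's own statement) =====
-- stated objective: alternative
-- what changed: B scans the string in reverse: it finds the index of the LAST alphabetic character and checks the two regions around it (suffix after it only digits/dots/spaces, prefix up to it only letters/spaces, first char alphabetic), instead of A's forward pass with a bets_are_off flag plus three helper validation passes.
import Mathlib
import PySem

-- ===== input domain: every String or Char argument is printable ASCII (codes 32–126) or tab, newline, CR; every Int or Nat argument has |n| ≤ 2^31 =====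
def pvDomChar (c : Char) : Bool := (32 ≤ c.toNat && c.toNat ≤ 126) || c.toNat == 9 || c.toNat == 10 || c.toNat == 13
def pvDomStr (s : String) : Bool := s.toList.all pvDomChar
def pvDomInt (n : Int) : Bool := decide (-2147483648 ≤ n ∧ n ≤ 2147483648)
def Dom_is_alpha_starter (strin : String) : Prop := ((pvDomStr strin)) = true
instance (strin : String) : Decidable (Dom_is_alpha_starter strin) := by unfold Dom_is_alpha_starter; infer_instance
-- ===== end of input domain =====

-- B scans the REVERSED string: it locates the LAST alphabetic character and checks the two
-- regions around it (only digits/dots/spaces after it, only letters/spaces up to it),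
-- replacing A's forward flag scan and helper chain (objective: alternative decomposition).

-- ===== PORT A =====
def pyIsNroSymbolSequence : List Char → Bool
  | [] => true
  | c :: rest =>
      if (['0','1','2','3','4','5','6','7','8','9','.'].contains c) = false then false
      else pyIsNroSymbolSequence rest

def pyIsNrosAndLetters : List Char → Bool
  | [] => true
  | c :: rest =>
      if pyIsNroSymbolSequence [c] == false && PySem.Chars.isalpha c == false && !(c == ' ') then false
      else pyIsNrosAndLetters rest

def pyIsPureAlpha : List Char → Bool
  | [] => true
  | c :: rest => if PySem.Chars.isalpha c == false then false else pyIsPureAlpha rest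

def loopA : List Char → Bool → Bool
  | [], _ => true
  | c :: rest, bets =>
      let bets' := if PySem.Chars.isalpha c == false && !(c == ' ') then true else bets
      if bets' && PySem.Chars.isalpha c then false else loopA rest bets'

def is_alpha_starter (strin : String) : Bool :=
  match strin.toList with
  | [] => false
  | c :: rest =>
      if pyIsNrosAndLetters (c :: rest) == false then false
      else if pyIsPureAlpha [c] == false then false
      else loopA (c :: rest) false

-- ===== PORT B =====
-- ch in "0123456789. "
def ddsp (c : Char) : Bool := ['0','1','2','3','4','5','6','7','8','9','.',' '].contains c
-- ch.isalpha() or ch == " "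
def alsp (c : Char) : Bool := PySem.Chars.isalpha c || c == ' '

def is_alpha_starter_alt (strin : String) : Bool :=
  let rev := strin.toList.reverse      -- strin[::-1] (PySem.Str.slice?_none_none_neg_one)
  match rev.findIdx? PySem.Chars.isalpha with   -- next((i for i,ch in enumerate(rev) if ch.isalpha()), None)
  | none => false
  | some k =>
      if (rev.take k).any (fun ch => !ddsp ch) then false
      else if (rev.drop k).any (fun ch => !alsp ch) then false
      else match PySem.List.pyGet? rev (-1) with   -- rev[-1]; some: rev is nonempty here
           | some ch => PySem.Chars.isalpha ch
           | none => false

-- ===== PRECONDITION & SPEC =====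
def Spec_is_alpha_starter (strin : String) (out : Bool) : Prop := out = is_alpha_starter_alt strin
instance (strin : String) (out : Bool) : Decidable (Spec_is_alpha_starter strin out) := by unfold Spec_is_alpha_starter; infer_instance

-- ===== CLAIM (what is proved, stated in full; the proofs are below) =====
def Claim_equal_is_alpha_starter : Prop := ∀ (strin : String), Dom_is_alpha_starter strin → Spec_is_alpha_starter strin (is_alpha_starter strin)

-- ===== LEMMAS AND PROOFS =====

def isDigitDot (c : Char) : Bool := ['0','1','2','3','4','5','6','7','8','9','.'].contains c

lemma digitDot_not_alpha {c : Char} (h : isDigitDot c = true) :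
    PySem.Chars.isalpha c = false ∧ (c == ' ') = false := by
  simp only [isDigitDot, List.contains_eq_mem, decide_eq_true_eq] at h
  fin_cases h <;> decide

lemma ddsp_iff (c : Char) : ddsp c = true ↔ (isDigitDot c = true ∨ c = ' ') := by
  simp only [ddsp, isDigitDot, List.contains_eq_mem, decide_eq_true_eq, List.mem_cons,
    List.not_mem_nil, or_false]
  tauto

lemma nrosAndLetters_eq (l : List Char) :
    pyIsNrosAndLetters l = !(l.any (fun ch => !(PySem.Chars.isalpha ch || ch == ' ' || isDigitDot ch))) := by
  induction l with
  | nil => rfl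
  | cons c r ih =>
      have hseq : pyIsNroSymbolSequence [c] = isDigitDot c := by
        simp only [pyIsNroSymbolSequence, isDigitDot]
        cases h : List.contains ['0','1','2','3','4','5','6','7','8','9','.'] c <;> simp
      simp only [pyIsNrosAndLetters, hseq, List.any_cons]
      cases hd : isDigitDot c <;> cases ha : PySem.Chars.isalpha c <;>
        cases hs : (c == ' ') <;> simp [ih]

lemma loopA_true (l : List Char) : loopA l true = !(l.any PySem.Chars.isalpha) := by
  induction l with
  | nil => rfl
  | cons c r ih =>
      simp only [loopA, List.any_cons]
      cases ha : PySem.Chars.isalpha c <;> simp [ih]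

lemma loopA_false (l : List Char)
    (hgood : ∀ c ∈ l, (PySem.Chars.isalpha c || c == ' ' || isDigitDot c) = true) :
    loopA l false = (match l.findIdx? isDigitDot with
                     | none => true
                     | some i => !((l.drop i).any PySem.Chars.isalpha)) := by
  induction l with
  | nil => rfl
  | cons c r ih =>
      have hc := hgood c (List.mem_cons_self ..)
      have ihr := ih (fun x hx => hgood x (List.mem_cons_of_mem _ hx))
      cases hd : isDigitDot c
      · have hc' : PySem.Chars.isalpha c = true ∨ c = ' ' := by
          cases h1 : PySem.Chars.isalpha c <;> cases h2 : (c == ' ') <;> simp_all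
        cases hfi : r.findIdx? isDigitDot with
        | none =>
            rcases hc' with ha | hs
            · simp [loopA, ha, List.findIdx?_cons, hd, ihr, hfi]
            · subst hs; simp [loopA, PySem.Chars.isalpha, List.findIdx?_cons, hd, ihr, hfi]
        | some i =>
            rcases hc' with ha | hs
            · simp [loopA, ha, List.findIdx?_cons, hd, ihr, hfi, List.drop_succ_cons]
            · subst hs
              simp [loopA, PySem.Chars.isalpha, List.findIdx?_cons, hd, ihr, hfi, List.drop_succ_cons]
      · obtain ⟨ha, hs⟩ := digitDot_not_alpha hd
        simp [loopA, ha, hs, loopA_true, List.findIdx?_cons, hd]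

-- membership of drop by index
lemma mem_drop_iff {α : Type} (l : List α) (k : Nat) (x : α) :
    x ∈ l.drop k ↔ ∃ j, ∃ h : j < l.length, k ≤ j ∧ l[j] = x := by
  constructor
  · intro hx
    obtain ⟨m, hm, he⟩ := List.mem_iff_getElem.mp hx
    rw [List.length_drop] at hm
    refine ⟨k + m, by omega, by omega, ?_⟩
    rw [← he, List.getElem_drop]
  · rintro ⟨j, hj, hkj, he⟩
    apply List.mem_iff_getElem.mpr
    refine ⟨j - k, by rw [List.length_drop]; omega, ?_⟩
    rw [List.getElem_drop]
    rw [← he]; congr 1; omega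

lemma mem_take_iff {α : Type} (l : List α) (k : Nat) (x : α) :
    x ∈ l.take k ↔ ∃ j, ∃ h : j < l.length, j < k ∧ l[j] = x := by
  constructor
  · intro hx
    obtain ⟨m, hm, he⟩ := List.mem_iff_getElem.mp hx
    rw [List.length_take] at hm
    refine ⟨m, by omega, by omega, ?_⟩
    rw [← he, List.getElem_take]
  · rintro ⟨j, hj, hkj, he⟩
    apply List.mem_iff_getElem.mpr
    refine ⟨j, by rw [List.length_take]; omega, ?_⟩
    rw [List.getElem_take, he]

-- ===== VERDICT (by name: the statement is the Claim_ definition above) =====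
theorem is_alpha_starter_spec : Claim_equal_is_alpha_starter := by
  intro strin _
  unfold Spec_is_alpha_starter is_alpha_starter is_alpha_starter_alt
  cases hl : strin.toList with
  | nil => rfl
  | cons c r =>
      show (if pyIsNrosAndLetters (c :: r) == false then false
            else if pyIsPureAlpha [c] == false then false
            else loopA (c :: r) false) =
           (match ((c :: r).reverse).findIdx? PySem.Chars.isalpha with
            | none => false
            | some k =>
              if (((c :: r).reverse).take k).any (fun ch => !ddsp ch) then false
              else if (((c :: r).reverse).drop k).any (fun ch => !alsp ch) then false
              else match PySem.List.pyGet? ((c :: r).reverse) (-1) with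
                   | some ch => PySem.Chars.isalpha ch
                   | none => false)
      set l := c :: r with hldef
      set rev := l.reverse with hrev
      rw [nrosAndLetters_eq]
      -- the last element of rev is c
      have hrevne : rev ≠ [] := by simp [hrev, hldef]
      have hlast : PySem.List.pyGet? rev (-1) = some c := by
        rw [PySem.List.pyGet?_neg_one, hrev, List.getLast?_reverse]
        simp [hldef]
      cases hk : rev.findIdx? PySem.Chars.isalpha with
      | none =>
          -- no alpha anywhere, in particular c is not alpha
          have hnoal := List.findIdx?_eq_none_iff.mp hk
          have hc : PySem.Chars.isalpha c = false := by
            apply hnoal; simp [hrev, hldef]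
          have hpure : pyIsPureAlpha [c] = false := by simp [pyIsPureAlpha, hc]
          simp [hpure]
      | some k =>
          obtain ⟨hk1, hk2, hk3⟩ := List.findIdx?_eq_some_iff_getElem.mp hk
          cases hbad : l.any (fun ch => !(PySem.Chars.isalpha ch || ch == ' ' || isDigitDot ch)) with
          | true =>
              -- some invalid char exists: A is false; B's region checks also reject it
              obtain ⟨x, hxmem, hxbad⟩ := List.any_eq_true.mp hbad
              simp only [Bool.not_eq_eq_eq_not, Bool.not_true] at hxbad
              have hxrev : x ∈ rev := by rw [hrev]; exact List.mem_reverse.mpr hxmem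
              obtain ⟨j, hj, hje⟩ := List.mem_iff_getElem.mp hxrev
              have hx3 : isDigitDot x = false ∧ PySem.Chars.isalpha x = false ∧ (x == ' ') = false := by
                cases h1 : PySem.Chars.isalpha x <;> cases h2 : (x == ' ') <;>
                  cases h3 : isDigitDot x <;> simp_all
              obtain ⟨hxd, hxa, hxs⟩ := hx3
              by_cases hjk : j < k
              · have h1 : (rev.take k).any (fun ch => !ddsp ch) = true := by
                  apply List.any_eq_true.mpr
                  refine ⟨x, (mem_take_iff _ _ _).mpr ⟨j, hj, hjk, hje⟩, ?_⟩
                  have : ddsp x = false := by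
                    cases h : ddsp x
                    · rfl
                    · exfalso
                      rcases (ddsp_iff x).mp h with h' | h'
                      · rw [h'] at hxd; exact Bool.noConfusion hxd
                      · subst h'; simp at hxs
                  simp [this]
                simp [h1]
              · have h2 : (rev.drop k).any (fun ch => !alsp ch) = true := by
                  apply List.any_eq_true.mpr
                  refine ⟨x, (mem_drop_iff _ _ _).mpr ⟨j, hj, by omega, hje⟩, ?_⟩
                  simp [alsp, hxa, hxs]
                have h1 : (rev.take k).any (fun ch => !ddsp ch) = false ∨
                    (rev.take k).any (fun ch => !ddsp ch) = true := by
                  cases (rev.take k).any (fun ch => !ddsp ch) <;> simp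
                rcases h1 with h1 | h1 <;> simp [h1, h2]
          | false =>
              -- all chars valid
              have hgood : ∀ x ∈ l, (PySem.Chars.isalpha x || x == ' ' || isDigitDot x) = true := by
                intro x hx
                have hx' := (List.any_eq_false.mp hbad) x hx
                cases h1 : PySem.Chars.isalpha x <;> cases h2 : (x == ' ') <;>
                  cases h3 : isDigitDot x <;> simp_all
              have hgoodrev : ∀ x ∈ rev, (PySem.Chars.isalpha x || x == ' ' || isDigitDot x) = true := by
                intro x hx; exact hgood x (by rw [hrev] at hx; exact List.mem_reverse.mp hx)
              -- the prefix of rev before the first alpha is all digit/dot/space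
              have htake : (rev.take k).any (fun ch => !ddsp ch) = false := by
                apply List.any_eq_false.mpr
                intro x hx
                obtain ⟨j, hj, hjk, hje⟩ := (mem_take_iff _ _ _).mp hx
                have hna : PySem.Chars.isalpha x = false := by
                  have := hk3 j hjk
                  rw [hje] at this; simpa using this
                have hv := hgoodrev x (by exact List.mem_of_mem_take hx)
                have : ddsp x = true := by
                  apply (ddsp_iff x).mpr
                  cases h2 : (x == ' ')
                  · left; cases h3 : isDigitDot x
                    · rw [hna, h2, h3] at hv; simp at hv
                    · rfl
                  · right; exact eq_of_beq h2
                simp [this]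
              rw [hrev] at *
              cases hc : PySem.Chars.isalpha c with
              | false =>
                  have hpure : pyIsPureAlpha [c] = false := by simp [pyIsPureAlpha, hc]
                  have hdrop : (l.reverse.drop k).any (fun ch => !alsp ch) = false ∨
                      (l.reverse.drop k).any (fun ch => !alsp ch) = true := by
                    cases (l.reverse.drop k).any (fun ch => !alsp ch) <;> simp
                  rcases hdrop with h2 | h2 <;> simp [hpure, htake, h2, hlast, hc]
              | true =>
                  have hpure : pyIsPureAlpha [c] = true := by simp [pyIsPureAlpha, hc]
                  rw [loopA_false l hgood]
                  simp only [hpure, htake, hlast]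
                  -- it remains: A's dd-split check equals B's suffix check
                  have hlen : l.reverse.length = l.length := List.length_reverse
                  have key : (match l.findIdx? isDigitDot with
                       | none => true
                       | some i => !((l.drop i).any PySem.Chars.isalpha)) =
                      !((l.reverse.drop k).any (fun ch => !alsp ch)) := by
                    cases hi : l.findIdx? isDigitDot with
                    | none =>
                        have hnodd := List.findIdx?_eq_none_iff.mp hi
                        have : (l.reverse.drop k).any (fun ch => !alsp ch) = false := by
                          apply List.any_eq_false.mpr
                          intro x hx
                          have hxl : x ∈ l := by
                            have := List.mem_of_mem_drop hx
                            exact List.mem_reverse.mp this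
                          have hv := hgood x hxl
                          have hd := hnodd x hxl
                          have : alsp x = true := by
                            rw [hd] at hv; simp only [Bool.or_false] at hv
                            simpa [alsp] using hv
                          simp [this]
                        simp [this]
                    | some i =>
                        obtain ⟨hi1, hi2, hi3⟩ := List.findIdx?_eq_some_iff_getElem.mp hi
                        -- both sides are "there is an alpha at position ≥ i" /
                        -- "there is a dd at position ≤ l.length-1-k"; show the Bool equality via iff
                        have step : (l.drop i).any PySem.Chars.isalpha =
                            (l.reverse.drop k).any (fun ch => !alsp ch) := by
                          cases hA : (l.drop i).any PySem.Chars.isalpha with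
                          | true =>
                              obtain ⟨x, hxm, hxa⟩ := List.any_eq_true.mp hA
                              obtain ⟨j, hj, hij, hje⟩ := (mem_drop_iff _ _ _).mp hxm
                              -- alpha at position j ≥ i; last alpha at p := l.length-1-k so j ≤ p
                              have hjp : j ≤ l.length - 1 - k := by
                                by_contra hcon
                                have hj' : l.length - 1 - j < k := by omega
                                have he2 : l.reverse[l.length - 1 - j]'(by rw [hlen]; omega) =
                                    l[j]'hj := by
                                  rw [List.getElem_reverse]; congr 1; omega
                                have hna := hk3 (l.length - 1 - j) hj'
                                rw [he2, hje, hxa] at hna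
                                exact hna rfl
                              -- then l[i] (a dd) sits in rev.drop k
                              symm
                              apply List.any_eq_true.mpr
                              refine ⟨l[i], ?_, ?_⟩
                              · apply (mem_drop_iff _ _ _).mpr
                                refine ⟨l.length - 1 - i, by rw [hlen]; omega, by omega, ?_⟩
                                rw [List.getElem_reverse]; congr 1; omega
                              · obtain ⟨h1, h2⟩ := digitDot_not_alpha hi2
                                simp [alsp, h1, h2]
                          | false =>
                              -- no alpha at/after i ⇒ every x in rev.drop k is alpha-or-space
                              symm
                              apply List.any_eq_false.mpr
                              intro x hx
                              obtain ⟨j, hj, hkj, hje⟩ := (mem_drop_iff _ _ _).mp hx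
                              rw [List.getElem_reverse] at hje
                              -- x = l[q] with q := l.length-1-j ≤ l.length-1-k
                              set q := l.length - 1 - j with hq
                              have hql : q < l.length := by rw [hlen] at hj; omega
                              have hv := hgood x (by rw [← hje]; exact List.getElem_mem hql)
                              -- if x were dd, then q ≥ i (first dd), but then l[p] with p=l.length-1-k
                              -- is an alpha at position ≥ i, contradicting hA
                              cases hd : isDigitDot x with
                              | false =>
                                  have : alsp x = true := by
                                    rw [hd] at hv; simp only [Bool.or_false] at hv
                                    simpa [alsp] using hv
                                  simp [this]
                              | true =>
                                  exfalso
                                  have hqi : i ≤ q := by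
                                    by_contra hcon
                                    have := hi3 q (by omega)
                                    rw [hje, hd] at this; exact this rfl
                                  have hp : PySem.Chars.isalpha l[l.length - 1 - k] = true := by
                                    have := hk2
                                    rw [List.getElem_reverse] at this
                                    exact this
                                  have : (l.drop i).any PySem.Chars.isalpha = true := by
                                    apply List.any_eq_true.mpr
                                    refine ⟨l[l.length - 1 - k], (mem_drop_iff _ _ _).mpr
                                      ⟨l.length - 1 - k, by rw [hlen] at hk1; omega, by omega, rfl⟩, hp⟩
                                  rw [hA] at this; exact absurd this (by simp)
                        show (!(List.drop i l).any PySem.Chars.isalpha) =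
                            !((List.drop k l.reverse).any fun ch => !alsp ch)
                        rw [step]
                  rw [key]
                  cases h : (l.reverse.drop k).any (fun ch => !alsp ch) <;> simp [hc]
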